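-- pv_equiv track=rewrite | github.com/alekseivoroshilov/db-course-spydatabase-2021 | cursov_db/db_interface.py | format_missions_with_person_operator
-- ===== SOURCE A (Python) =====
-- def format_missions_with_person_operator(missions):
--     missions_str = ""
--     i = 0
--     for mission in missions:
--         if i == 0:
--             missions_str += "mission_name: "
--             missions_str += str(mission)
--             missions_str += ' '
--             i += 1
--             continue
--         elif i == 1:
--             missions_str += "level: "
--             missions_str += str(mission)
--             missions_str += ' '
--             i += 1
--             continue
--         elif i == 2:
--             missions_str += "operator ID: "
--             missions_str += str(mission)
--             missions_str += '\n'
--             i += 1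
--             continue
--         elif i == 3:
--             missions_str += "operator name: "
--             missions_str += str(mission)
--             missions_str += '\n'
--             i += 1
--             continue
--         elif i == 4:
--             missions_str += "Mission status: "
--             missions_str += str(mission)
--             missions_str += '\n'
--             i += 1
--             continue
--         elif i == 5:
--             missions_str += "Mission info: "
--             missions_str += str(mission)
--             missions_str += '\n\n'
--             i = 0
--             continue
--     return missions_str
-- ===== SOURCE B (Python) =====
-- def format_missions_with_person_operator(missions):
--     LABELS = ["mission_name: ", "level: ", "operator ID: ",
--               "operator name: ", "Mission status: ", "Mission info: "]
--     SEPS = [' ', ' ', '\n', '\n', '\n', '\n\n']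
--     blocks = []
--     rest = list(reversed(missions))  # consume from the end: popping a chunk is O(1) per element
--     while rest:
--         chunk = [rest.pop() for _ in range(min(6, len(rest)))]
--         blocks.append("".join(l + str(m) + s for l, m, s in zip(LABELS, chunk, SEPS)))
--     return "".join(blocks)
-- ===== Notes on version B (the rewrite author's own statement) =====
-- stated objective: simpler
-- what changed: Instead of A's per-element loop with a hand-incremented/reset six-state counter and a six-way if/elif ladder, B traverses the list block-wise: a while loop pops the next chunk of up to six missions off the (reversed) working list and formats each chunk by zipping it with fixed LABELS/SEPS lists (zip truncation handles the partial last block), joining the blocks at the end.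
import Mathlib
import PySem

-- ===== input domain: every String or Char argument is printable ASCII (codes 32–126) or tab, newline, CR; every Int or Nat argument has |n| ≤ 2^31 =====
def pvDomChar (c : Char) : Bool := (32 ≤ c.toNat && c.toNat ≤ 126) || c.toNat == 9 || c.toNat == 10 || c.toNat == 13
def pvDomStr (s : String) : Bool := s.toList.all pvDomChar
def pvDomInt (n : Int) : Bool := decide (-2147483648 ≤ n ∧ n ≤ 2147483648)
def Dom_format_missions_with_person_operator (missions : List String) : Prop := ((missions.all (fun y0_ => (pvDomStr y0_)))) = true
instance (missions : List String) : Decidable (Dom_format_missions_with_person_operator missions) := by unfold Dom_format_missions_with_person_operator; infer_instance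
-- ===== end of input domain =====

-- B replaces A's per-element six-branch counter loop by block-wise traversal: it consumes the
-- list in chunks of 6 and zips each chunk with fixed label/separator lists; objective: simpler.


-- ===== PORT A =====
-- A's loop body: if/elif ladder on the hand-maintained counter i (reset to 0 after the 6th field).
def pvStepA (st : String × Int) (m : String) : String × Int :=
  if st.2 == 0 then (st.1 ++ "mission_name: " ++ m ++ " ", st.2 + 1)
  else if st.2 == 1 then (st.1 ++ "level: " ++ m ++ " ", st.2 + 1)
  else if st.2 == 2 then (st.1 ++ "operator ID: " ++ m ++ "\n", st.2 + 1)
  else if st.2 == 3 then (st.1 ++ "operator name: " ++ m ++ "\n", st.2 + 1)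
  else if st.2 == 4 then (st.1 ++ "Mission status: " ++ m ++ "\n", st.2 + 1)
  else if st.2 == 5 then (st.1 ++ "Mission info: " ++ m ++ "\n\n", (0 : Int))
  else st

def format_missions_with_person_operator (missions : List String) : String :=
  (missions.foldl pvStepA ("", 0)).1

-- ===== PORT B =====
def pvLabels : List String :=
  ["mission_name: ", "level: ", "operator ID: ", "operator name: ", "Mission status: ", "Mission info: "]
def pvSeps : List String := [" ", " ", "\n", "\n", "\n", "\n\n"]

-- one block: "".join(l + m + s for l, m, s in zip(LABELS, chunk, SEPS))  (zip truncates, as in Python)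
def pvBlock (chunk : List String) : String :=
  PySem.Str.join "" ((pvLabels.zip (chunk.zip pvSeps)).map (fun t => t.1 ++ t.2.1 ++ t.2.2))

-- the while loop: B pops up to 6 elements off the reversed working list per iteration, i.e. it
-- takes the next ≤6-chunk off the FRONT of the remaining missions and recurses on the rest;
-- that is exactly take 6 / drop 6 of the remaining list.
def pvBlocks : List String → List String
  | [] => []
  | x :: xs => pvBlock ((x :: xs).take 6) :: pvBlocks ((x :: xs).drop 6)
termination_by l => l.length
decreasing_by simp

def format_missions_with_person_operator_alt (missions : List String) : String :=
  PySem.Str.join "" (pvBlocks missions)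

-- ===== PRECONDITION & SPEC =====
def Spec_format_missions_with_person_operator (missions : List String) (out : String) : Prop := out = format_missions_with_person_operator_alt missions
instance (missions : List String) (out : String) : Decidable (Spec_format_missions_with_person_operator missions out) := by unfold Spec_format_missions_with_person_operator; infer_instance

-- ===== CLAIM (what is proved, stated in full; the proofs are below) =====
def Claim_equal_format_missions_with_person_operator : Prop := ∀ (missions : List String), Dom_format_missions_with_person_operator missions → Spec_format_missions_with_person_operator missions (format_missions_with_person_operator missions)

-- ===== LEMMAS AND PROOFS =====

lemma pvBlocks_nil : pvBlocks [] = [] := by rw [pvBlocks.eq_def]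

lemma pvBlocks_cons (x : String) (xs : List String) :
    pvBlocks (x :: xs) = pvBlock ((x :: xs).take 6) :: pvBlocks ((x :: xs).drop 6) := by
  rw [pvBlocks.eq_def]

lemma pv_join_nil : PySem.Str.join "" ([] : List String) = "" := by
  rw [← String.toList_inj]; simp [PySem.Str.toList_join, PySem.Chars.join, List.intercalate]

lemma pv_join_cons (a : String) (l : List String) :
    PySem.Str.join "" (a :: l) = a ++ PySem.Str.join "" l := by
  rw [← String.toList_inj]
  cases l <;> simp [PySem.Str.toList_join, PySem.Chars.join, List.intercalate]

-- the invariant: A's fold started at counter 0 produces the concatenation of B's blocks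
lemma pv_loop (n : Nat) : ∀ (ms : List String), ms.length ≤ n → ∀ s : String,
    (ms.foldl pvStepA (s, (0:Int))).1 = s ++ PySem.Str.join "" (pvBlocks ms) := by
  induction n with
  | zero =>
    intro ms h s
    have : ms = [] := List.eq_nil_of_length_eq_zero (Nat.le_zero.mp h)
    subst this
    simp [pvBlocks_nil, pv_join_nil]
  | succ n ih =>
    intro ms h s
    match ms with
    | [] => simp [pvBlocks_nil, pv_join_nil]
    | [a] =>
      rw [← String.toList_inj]
      simp [pvStepA, pvBlocks_cons, pvBlocks_nil, pvBlock, pvLabels, pvSeps,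
            PySem.Str.toList_join, PySem.Chars.join, List.intercalate]
    | [a, b] =>
      rw [← String.toList_inj]
      simp [pvStepA, pvBlocks_cons, pvBlocks_nil, pvBlock, pvLabels, pvSeps,
            PySem.Str.toList_join, PySem.Chars.join, List.intercalate]
    | [a, b, c] =>
      rw [← String.toList_inj]
      simp [pvStepA, pvBlocks_cons, pvBlocks_nil, pvBlock, pvLabels, pvSeps,
            PySem.Str.toList_join, PySem.Chars.join, List.intercalate]
    | [a, b, c, d] =>
      rw [← String.toList_inj]
      simp [pvStepA, pvBlocks_cons, pvBlocks_nil, pvBlock, pvLabels, pvSeps,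
            PySem.Str.toList_join, PySem.Chars.join, List.intercalate]
    | [a, b, c, d, e] =>
      rw [← String.toList_inj]
      simp [pvStepA, pvBlocks_cons, pvBlocks_nil, pvBlock, pvLabels, pvSeps,
            PySem.Str.toList_join, PySem.Chars.join, List.intercalate]
    | a :: b :: c :: d :: e :: f :: rest =>
      have hr : rest.length ≤ n := by simp at h; omega
      have h6 : List.foldl pvStepA (s, (0:Int)) (a :: b :: c :: d :: e :: f :: rest)
          = List.foldl pvStepA
              (s ++ "mission_name: " ++ a ++ " " ++ "level: " ++ b ++ " " ++ "operator ID: " ++ c ++ "\n"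
                 ++ "operator name: " ++ d ++ "\n" ++ "Mission status: " ++ e ++ "\n"
                 ++ "Mission info: " ++ f ++ "\n\n", (0:Int)) rest := by
        simp [pvStepA]
      rw [h6, ih rest hr]
      show _ = s ++ PySem.Str.join "" (pvBlocks (a :: b :: c :: d :: e :: f :: rest))
      rw [pvBlocks_cons]
      rw [pv_join_cons]
      rw [← String.toList_inj]
      simp [pvBlock, pvLabels, pvSeps, PySem.Str.toList_join, PySem.Chars.join, List.intercalate]

-- ===== VERDICT (by name: the statement is the Claim_ definition above) =====
theorem format_missions_with_person_operator_spec : Claim_equal_format_missions_with_person_operator := by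
  intro missions _
  unfold Spec_format_missions_with_person_operator format_missions_with_person_operator format_missions_with_person_operator_alt
  have := pv_loop missions.length missions le_rfl ""
  rw [this, ← String.toList_inj]
  simp
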